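-- pv_equiv track=rewrite | github.com/jjacevedo/profile-manager-ingenieria-de-software | backend/app/services/cv_parser.py | _extract_profile_description
-- ===== SOURCE A (Python) =====
-- PERSONAL_LABELS = ["nombre", "ciudad", "correo", "email", "telefono"]
--
-- def _extract_profile_description(text: str) -> str:
--     lines = [line.strip() for line in text.splitlines() if line.strip()]
--     profile_lines = []
--     capture = False
--     for line in lines:
--         low = line.lower()
--         if "perfil profesional" in low:
--             capture = True
--             continue
--         if capture and any(label in low for label in PERSONAL_LABELS):
--             continue
--         if capture and len(profile_lines) < 4:
--             profile_lines.append(line)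
--         if len(profile_lines) >= 4:
--             break
--     if profile_lines:
--         return " ".join(profile_lines)
--     return " ".join(lines[:4])
-- ===== SOURCE B (Python) =====
-- PERSONAL_LABELS = ["nombre", "ciudad", "correo", "email", "telefono"]
--
-- def _extract_profile_description(text: str) -> str:
--     lines = [s for s in (line.strip() for line in text.splitlines()) if s]
--     idx = next((i for i, line in enumerate(lines)
--                 if "perfil profesional" in line.lower()), None)
--     if idx is None:
--         return " ".join(lines[:4])
--     good = [line for line in lines[idx + 1:]
--             if "perfil profesional" not in line.lower()
--             and not any(lbl in line.lower() for lbl in PERSONAL_LABELS)][:4]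
--     return " ".join(good) if good else " ".join(lines[:4])
-- ===== Notes on version B (the rewrite author's own statement) =====
-- stated objective: alternative
-- what changed: Replaces the single stateful capture/continue/break loop with a locate-then-extract decomposition: find the index of the first 'perfil profesional' line, then filter-and-take-4 over the tail, with the lines[:4] fallback.
import Mathlib
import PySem

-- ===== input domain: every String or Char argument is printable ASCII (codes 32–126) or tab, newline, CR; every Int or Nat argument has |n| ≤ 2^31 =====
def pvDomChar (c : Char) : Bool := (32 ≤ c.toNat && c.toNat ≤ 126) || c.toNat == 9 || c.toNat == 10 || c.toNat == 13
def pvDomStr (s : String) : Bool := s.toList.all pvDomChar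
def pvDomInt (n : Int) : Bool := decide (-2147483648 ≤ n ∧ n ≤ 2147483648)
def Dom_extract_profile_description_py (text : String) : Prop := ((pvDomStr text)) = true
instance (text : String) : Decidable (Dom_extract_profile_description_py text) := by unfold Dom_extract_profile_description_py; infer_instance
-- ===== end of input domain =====

-- B changes the decomposition only (locate the marker line, then filter-and-take the tail); return values proved equal on all inputs.

-- ===== PORT A =====
def pvPersonalLabels : List String := ["nombre", "ciudad", "correo", "email", "telefono"]

-- the for-loop of A: state = (profile_lines acc, capture flag); 'break' = returning early
def pvLoopA : List String → List String → Bool → List String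
  | [], acc, _ => acc
  | l :: ls, acc, capture =>
    let low := PySem.Str.lower l
    if PySem.Str.isIn "perfil profesional" low then
      pvLoopA ls acc true
    else if capture && pvPersonalLabels.any (fun lbl => PySem.Str.isIn lbl low) then
      pvLoopA ls acc capture
    else
      let acc' := if capture && acc.length < 4 then acc ++ [l] else acc
      if 4 ≤ acc'.length then acc' else pvLoopA ls acc' capture

def extract_profile_description_py (text : String) : String :=
  let lines := ((PySem.Str.splitlines text).map PySem.Str.strip).filter (fun s => !(s == ""))
  let profile_lines := pvLoopA lines [] false
  if !(profile_lines == []) then PySem.Str.join " " profile_lines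
  else PySem.Str.join " " (PySem.List.slice lines none (some 4))

-- ===== PORT B =====
def pvGoodLine (l : String) : Bool :=
  !(PySem.Str.isIn "perfil profesional" (PySem.Str.lower l)) &&
  !(pvPersonalLabels.any (fun lbl => PySem.Str.isIn lbl (PySem.Str.lower l)))

def extract_profile_description_py_alt (text : String) : String :=
  let lines := ((PySem.Str.splitlines text).map PySem.Str.strip).filter (fun s => !(s == ""))
  match lines.findIdx? (fun l => PySem.Str.isIn "perfil profesional" (PySem.Str.lower l)) with
  | none => PySem.Str.join " " (lines.take 4)
  | some i =>
    let good := ((lines.drop (i + 1)).filter pvGoodLine).take 4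
    if !(good == []) then PySem.Str.join " " good
    else PySem.Str.join " " (lines.take 4)

-- ===== PRECONDITION & SPEC =====
def Spec_extract_profile_description_py (text : String) (out : String) : Prop := out = extract_profile_description_py_alt text
instance (text : String) (out : String) : Decidable (Spec_extract_profile_description_py text out) := by unfold Spec_extract_profile_description_py; infer_instance

-- ===== CLAIM (what is proved, stated in full; the proofs are below) =====
def Claim_equal_extract_profile_description_py : Prop := ∀ (text : String), Dom_extract_profile_description_py text → Spec_extract_profile_description_py text (extract_profile_description_py text)

-- ===== LEMMAS AND PROOFS =====

-- capture phase: with fewer than 4 collected lines, the loop returns the first 4 good lines appended to acc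
theorem pvLoopA_capture (ls : List String) : ∀ (acc : List String), acc.length < 4 →
    pvLoopA ls acc true = (acc ++ ls.filter pvGoodLine).take 4 := by
  induction ls with
  | nil =>
    intro acc h
    simp only [pvLoopA, List.filter_nil, List.append_nil]
    rw [List.take_of_length_le (le_of_lt h)]
  | cons l ls ih =>
    intro acc h
    by_cases hm : PySem.Str.isIn "perfil profesional" (PySem.Str.lower l) = true
    · rw [List.filter_cons_of_neg (by unfold pvGoodLine; rw [hm]; simp)]
      simp only [pvLoopA]
      rw [if_pos hm, ih acc h]
    · by_cases hl : pvPersonalLabels.any (fun lbl => PySem.Str.isIn lbl (PySem.Str.lower l)) = true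
      · rw [List.filter_cons_of_neg (by unfold pvGoodLine; rw [hl]; simp only [Bool.not_true,
          Bool.and_false, Bool.false_eq_true, not_false_eq_true])]
        simp only [pvLoopA]
        rw [if_neg hm, if_pos (by simp only [Bool.true_and]; exact hl), ih acc h]
      · have hm' : PySem.Str.isIn "perfil profesional" (PySem.Str.lower l) = false := by
          simp only [Bool.not_eq_true] at hm; exact hm
        have hl' : pvPersonalLabels.any (fun lbl => PySem.Str.isIn lbl (PySem.Str.lower l)) = false := by
          simp only [Bool.not_eq_true] at hl; exact hl
        rw [List.filter_cons_of_pos (by unfold pvGoodLine; rw [hm', hl']; rfl)]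
        simp only [pvLoopA]
        rw [if_neg hm, if_neg (by simp only [Bool.true_and]; exact hl)]
        have hinner : (true && decide (acc.length < 4)) = true := by
          simp only [Bool.true_and, decide_eq_true_eq]; exact h
        rw [if_pos hinner]
        by_cases h4 : 4 ≤ (acc ++ [l]).length
        · rw [if_pos h4]
          have h4' : (acc ++ [l]).length = 4 := by simp at h4 ⊢; omega
          rw [show acc ++ l :: List.filter pvGoodLine ls = (acc ++ [l]) ++ List.filter pvGoodLine ls by simp]
          rw [List.take_append_of_le_length h4'.ge, List.take_of_length_le h4'.le]
        · rw [if_neg h4, ih _ (by simp at h4 ⊢; omega)]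
          simp [List.append_assoc]

-- search phase: before the first marker line nothing is collected
theorem pvLoopA_search (ls : List String) :
    pvLoopA ls [] false =
      match ls.findIdx? (fun l => PySem.Str.isIn "perfil profesional" (PySem.Str.lower l)) with
      | none => []
      | some i => ((ls.drop (i + 1)).filter pvGoodLine).take 4 := by
  induction ls with
  | nil => simp [pvLoopA]
  | cons l ls ih =>
    by_cases hm : PySem.Str.isIn "perfil profesional" (PySem.Str.lower l) = true
    · rw [List.findIdx?_cons, if_pos hm]
      simp only [pvLoopA]
      rw [if_pos hm, pvLoopA_capture ls [] (by norm_num)]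
      simp only [List.nil_append, List.drop_succ_cons, List.drop_zero]
    · rw [List.findIdx?_cons, if_neg hm]
      simp only [pvLoopA, Bool.false_and, Bool.false_eq_true, if_false, List.length_nil]
      rw [if_neg hm, if_neg (by omega), ih]
      cases hf : ls.findIdx? (fun l => PySem.Str.isIn "perfil profesional" (PySem.Str.lower l)) with
      | none => simp
      | some j => simp

-- ===== VERDICT (by name: the statement is the Claim_ definition above) =====
theorem extract_profile_description_py_spec : Claim_equal_extract_profile_description_py := by
  intro text _
  unfold Spec_extract_profile_description_py extract_profile_description_py extract_profile_description_py_alt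
  simp only [pvLoopA_search]
  have hs : PySem.List.slice (((PySem.Str.splitlines text).map PySem.Str.strip).filter
      (fun s => !(s == ""))) none (some 4) =
      (((PySem.Str.splitlines text).map PySem.Str.strip).filter (fun s => !(s == ""))).take 4 := by
    rw [PySem.List.slice_to _ (by norm_num)]
    rfl
  rw [hs]
  cases hf : (((PySem.Str.splitlines text).map PySem.Str.strip).filter (fun s => !(s == ""))).findIdx?
      (fun l => PySem.Str.isIn "perfil profesional" (PySem.Str.lower l)) with
  | none => rfl
  | some i => rfl
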